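-- pv_equiv track=rewrite | github.com/Baraahalfasly/LearnPython | decompose_number.py | sum_round
-- ===== SOURCE A (Python) =====
-- def sum_round(num):
--     result = []
--     place_value = 1
--
--     while num > 0:
--         digit = num % 10
--         if digit != 0:
--             result.append(str(digit * place_value))
--         num //= 10
--         place_value *= 10
--
--     return " ".join(result[::-1])
-- ===== SOURCE B (Python) =====
-- def sum_round(num):
--     def parts(n, place):
--         if n <= 0:
--             return []
--         rest = parts(n // 10, place * 10)
--         d = n % 10
--         if d != 0:
--             rest.append(str(d * place))
--         return rest
--     return " ".join(parts(num, 1))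
-- ===== Notes on version B (the rewrite author's own statement) =====
-- stated objective: alternative
-- what changed: Replaces the iterative least-significant-first loop with an accumulator list and a final [::-1] reversal by a recursion that returns the components already in most-significant-first order, so no reversal and no loop state are needed.
import Mathlib
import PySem

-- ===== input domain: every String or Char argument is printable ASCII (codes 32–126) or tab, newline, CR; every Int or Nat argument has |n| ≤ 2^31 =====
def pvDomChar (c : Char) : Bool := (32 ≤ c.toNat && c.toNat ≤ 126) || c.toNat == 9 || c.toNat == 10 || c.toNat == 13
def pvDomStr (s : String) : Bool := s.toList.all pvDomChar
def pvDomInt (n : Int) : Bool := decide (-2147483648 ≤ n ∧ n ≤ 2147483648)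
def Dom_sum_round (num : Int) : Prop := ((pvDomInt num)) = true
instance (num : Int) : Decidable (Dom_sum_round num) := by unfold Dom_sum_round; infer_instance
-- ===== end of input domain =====

-- B replaces A's LSB-first loop + final [::-1] reversal by a recursion returning the
-- place-value components already in most-significant-first order (alternative decomposition).


-- ===== PORT A =====
-- the while loop: state = (num, place_value, result), appends least-significant components first
def sumRoundLoopA (num place : Int) (acc : List String) : List String :=
  if h : num > 0 then
    let digit := PySem.Int.mod num 10
    let acc' := if digit ≠ 0 then acc ++ [PySem.Int.toStr (digit * place)] else acc
    sumRoundLoopA (PySem.Int.floordiv num 10) (place * 10) acc'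
  else acc
termination_by num.toNat
decreasing_by
  rw [PySem.Int.floordiv_eq_ediv_of_pos (by omega : (0:Int) < 10)]
  omega

def sum_round (num : Int) : String :=
  PySem.Str.join " " ((PySem.List.slice? (sumRoundLoopA num 1 []) none none (-1)).getD [])

-- ===== PORT B =====
-- recursive helper 'parts': returns the components already most-significant-first
def sumRoundPartsB (n place : Int) : List String :=
  if _h : n ≤ 0 then []
  else
    let rest := sumRoundPartsB (PySem.Int.floordiv n 10) (place * 10)
    let d := PySem.Int.mod n 10
    if d ≠ 0 then rest ++ [PySem.Int.toStr (d * place)] else rest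
termination_by n.toNat
decreasing_by
  rw [PySem.Int.floordiv_eq_ediv_of_pos (by omega : (0:Int) < 10)]
  omega

def sum_round_alt (num : Int) : String :=
  PySem.Str.join " " (sumRoundPartsB num 1)

-- ===== PRECONDITION & SPEC =====
def Spec_sum_round (num : Int) (out : String) : Prop := out = sum_round_alt num
instance (num : Int) (out : String) : Decidable (Spec_sum_round num out) := by unfold Spec_sum_round; infer_instance

-- ===== CLAIM (what is proved, stated in full; the proofs are below) =====
def Claim_equal_sum_round : Prop := ∀ (num : Int), Dom_sum_round num → Spec_sum_round num (sum_round num)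

-- ===== LEMMAS AND PROOFS =====

-- A's loop result is the accumulator followed by B's list reversed
theorem loopA_eq_partsB_reverse (k : Nat) :
    ∀ (n place : Int) (acc : List String), n.toNat ≤ k →
      sumRoundLoopA n place acc = acc ++ (sumRoundPartsB n place).reverse := by
  induction k with
  | zero =>
    intro n place acc hk
    have hn : ¬ n > 0 := by omega
    rw [sumRoundLoopA, sumRoundPartsB]
    simp [hn, show n ≤ 0 by omega]
  | succ k ih =>
    intro n place acc hk
    by_cases hn : n > 0
    · rw [sumRoundLoopA, sumRoundPartsB]
      have hdiv : (PySem.Int.floordiv n 10).toNat ≤ k := by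
        rw [PySem.Int.floordiv_eq_ediv_of_pos (by omega : (0:Int) < 10)]
        omega
      simp only [hn, dif_pos, dif_neg (show ¬ n ≤ 0 by omega)]
      rw [ih _ _ _ hdiv]
      by_cases hd : (10:Int) ∣ n <;> simp [hd]
    · rw [sumRoundLoopA, sumRoundPartsB]
      simp [hn, show n ≤ 0 by omega]

-- ===== VERDICT (by name: the statement is the Claim_ definition above) =====
theorem sum_round_spec : Claim_equal_sum_round := by
  intro num _
  unfold Spec_sum_round sum_round sum_round_alt
  rw [PySem.List.slice?_none_none_neg_one,
      loopA_eq_partsB_reverse num.toNat num 1 [] le_rfl]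
  simp
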